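-- pv_equiv track=rewrite | github.com/posl/comment_recommendation | script/mod_gen/2_time/zh/223_C/6.py | get_min_max_str
-- ===== SOURCE A (Python) =====
-- def get_min_max_str(s):
--     l = len(s)
--     min_str = s
--     max_str = s
--     for i in range(l):
--         tmp_str = s[i:] + s[:i]
--         if tmp_str < min_str:
--             min_str = tmp_str
--         if tmp_str > max_str:
--             max_str = tmp_str
--     return min_str, max_str
-- ===== SOURCE B (Python) =====
-- def get_min_max_str(s):
--     n = len(s)
--     if n == 0:
--         return s, s
--     d = s + s
--     lo = list(range(n))
--     hi = list(range(n))
--     w = 1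
--     while w < n:
--         w += w
--         c = min(d[j:j + w] for j in lo)
--         lo = [j for j in lo if d[j:j + w] == c]
--         C = max(d[j:j + w] for j in hi)
--         hi = [j for j in hi if d[j:j + w] == C]
--     return d[lo[0]:lo[0] + n], d[hi[0]:hi[0] + n]
-- ===== Notes on version B (the rewrite author's own statement) =====
-- stated objective: faster
-- what changed: B never materialises the n rotations: it keeps two sets of candidate start positions in the doubled string and prunes them in prefix-doubling tournament rounds (compare windows of width 2,4,8,... and keep only the minimal/maximal ones), reading the answer off the surviving positions, instead of A's scan that builds every rotation and updates running min/max accumulators.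
import Mathlib
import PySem

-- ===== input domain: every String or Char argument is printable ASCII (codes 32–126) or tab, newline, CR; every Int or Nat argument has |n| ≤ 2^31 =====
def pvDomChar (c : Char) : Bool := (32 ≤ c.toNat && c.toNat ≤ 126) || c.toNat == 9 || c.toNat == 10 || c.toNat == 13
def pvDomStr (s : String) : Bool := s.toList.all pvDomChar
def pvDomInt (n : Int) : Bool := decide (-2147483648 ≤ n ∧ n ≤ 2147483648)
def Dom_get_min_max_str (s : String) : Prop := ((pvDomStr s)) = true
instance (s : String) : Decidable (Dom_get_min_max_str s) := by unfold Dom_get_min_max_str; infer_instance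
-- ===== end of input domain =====

-- B prunes candidate start positions by a prefix-doubling tournament on the doubled string
-- (log-many filtering rounds over surviving indices) instead of A's scan that materialises
-- every rotation and keeps running min/max (alternative algorithm; faster on typical strings).

-- ===== PORT A =====
def get_min_max_str (s : String) : String × String :=
  let cs := s.toList
  let l : Int := cs.length
  let r := (PySem.List.pyRange 0 l 1).foldl
    (fun (st : List Char × List Char) i =>
      let tmp := PySem.List.slice cs (some i) none ++ PySem.List.slice cs none (some i)
      (if tmp < st.1 then tmp else st.1, if st.2 < tmp then tmp else st.2))
    (cs, cs)
  (String.ofList r.1, String.ofList r.2)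

-- ===== PORT B =====
-- the 'while w < n' loop of Source B: w doubles each round; lo/hi are the surviving start indices
def pvLoop (d : List Char) (nn : Nat) (w : Nat) (hw : 0 < w) (lo hi : List Int) :
    List Int × List Int :=
  if h : w < nn then
    let w2 := w + w
    let c := (PySem.List.min?
      (lo.map fun j => PySem.List.slice d (some j) (some (j + (w2 : Int)))) (fun x => x)).getD []
    let lo' := lo.filter fun j =>
      PySem.List.slice d (some j) (some (j + (w2 : Int))) == c
    let cc := (PySem.List.max?
      (hi.map fun j => PySem.List.slice d (some j) (some (j + (w2 : Int)))) (fun x => x)).getD []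
    let hi' := hi.filter fun j =>
      PySem.List.slice d (some j) (some (j + (w2 : Int))) == cc
    pvLoop d nn w2 (by omega) lo' hi'
  else (lo, hi)
termination_by nn - w

def get_min_max_str_alt (s : String) : String × String :=
  let cs := s.toList
  let n := cs.length
  if n = 0 then (s, s)
  else
    let d := cs ++ cs
    let r := pvLoop d n 1 (by omega) (PySem.List.pyRange 0 (n : Int) 1)
      (PySem.List.pyRange 0 (n : Int) 1)
    let i := PySem.List.pyGetD r.1 0 0
    let j := PySem.List.pyGetD r.2 0 0
    (String.ofList (PySem.List.slice d (some i) (some (i + (n : Int)))),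
     String.ofList (PySem.List.slice d (some j) (some (j + (n : Int)))))

-- ===== PRECONDITION & SPEC =====
def Spec_get_min_max_str (s : String) (out : String × String) : Prop := out = get_min_max_str_alt s
instance (s : String) (out : String × String) : Decidable (Spec_get_min_max_str s out) := by unfold Spec_get_min_max_str; infer_instance

-- ===== CLAIM (what is proved, stated in full; the proofs are below) =====
def Claim_equal_get_min_max_str : Prop := ∀ (s : String), Dom_get_min_max_str s → Spec_get_min_max_str s (get_min_max_str s)

-- ===== LEMMAS AND PROOFS =====

-- rotation of cs starting at j
def pvRot (cs : List Char) (j : Nat) : List Char := cs.drop j ++ cs.take j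

-- the width-w comparison key of start position j: d[j:j+w] on the doubled string
def pvKey (cs : List Char) (w : Nat) (j : Nat) : List Char := ((cs ++ cs).drop j).take w

-- positions whose width-w key is minimal (resp. maximal) among all start positions
def pvAmin (cs : List Char) (w : Nat) : List Nat :=
  (List.range cs.length).filter
    (fun j => decide (∀ j' ∈ List.range cs.length, pvKey cs w j ≤ pvKey cs w j'))

def pvAmax (cs : List Char) (w : Nat) : List Nat :=
  (List.range cs.length).filter
    (fun j => decide (∀ j' ∈ List.range cs.length, pvKey cs w j' ≤ pvKey cs w j))

-- lex order is preserved by truncation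
theorem pv_take_lt (t : Nat) (u v : List Char) (h : u.take t < v.take t) : u < v := by
  induction t generalizing u v with
  | zero => simp at h
  | succ t ih =>
    cases u with
    | nil =>
      cases v with
      | nil => simp at h
      | cons b v' => exact List.nil_lt_cons b v'
    | cons a u' =>
      cases v with
      | nil => simp at h
      | cons b v' =>
        simp only [List.take_succ_cons, List.cons_lt_cons_iff] at h ⊢
        exact h.imp id (fun hp => ⟨hp.1, ih u' v' hp.2⟩)

theorem pv_take_le (t : Nat) (u v : List Char) (h : u ≤ v) : u.take t ≤ v.take t := by
  by_contra hc
  exact absurd (pv_take_lt t v u (not_le.mp hc)) (not_lt.mpr h)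

-- keys truncate to smaller keys
theorem pvKey_take (cs : List Char) (v w j : Nat) (hvw : v ≤ w) :
    (pvKey cs w j).take v = pvKey cs v j := by
  simp [pvKey, List.take_take, Nat.min_eq_left hvw]

theorem pvKey_mono (cs : List Char) (v w j j' : Nat) (hvw : v ≤ w)
    (h : pvKey cs w j ≤ pvKey cs w j') : pvKey cs v j ≤ pvKey cs v j' := by
  rw [← pvKey_take cs v w j hvw, ← pvKey_take cs v w j' hvw]
  exact pv_take_le v _ _ h

-- the width-n key of a start position j < n IS the rotation starting at j
theorem pvKey_len (cs : List Char) (j : Nat) (hj : j ≤ cs.length) :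
    pvKey cs cs.length j = pvRot cs j := by
  unfold pvKey pvRot
  rw [List.drop_append_of_le_length hj, List.take_append]
  have h1 : (cs.drop j).length = cs.length - j := List.length_drop ..
  rw [h1]
  have h2 : cs.length - (cs.length - j) = j := by omega
  rw [List.take_of_length_le (by omega), h2]

theorem pvKey_rot (cs : List Char) (u j : Nat) (hj : j ≤ cs.length) (hu : cs.length ≤ u) :
    (pvKey cs u j).take cs.length = pvRot cs j := by
  rw [pvKey_take cs cs.length u j hu, pvKey_len cs j hj]

-- membership in pvAmin / pvAmax
theorem mem_pvAmin (cs : List Char) (w j : Nat) :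
    j ∈ pvAmin cs w ↔ j < cs.length ∧ ∀ j' < cs.length, pvKey cs w j ≤ pvKey cs w j' := by
  simp [pvAmin, List.mem_filter, List.mem_range]

theorem mem_pvAmax (cs : List Char) (w j : Nat) :
    j ∈ pvAmax cs w ↔ j < cs.length ∧ ∀ j' < cs.length, pvKey cs w j' ≤ pvKey cs w j := by
  simp [pvAmax, List.mem_filter, List.mem_range]

-- Decidable-instance alignment for PySem.List.min?/max? lemmas on List Char keys
theorem pvDecEq : (fun (a b : List Char) => a.decidableLT b)
    = (LinearOrder.toDecidableLT : DecidableRel (· < · : List Char → List Char → Prop)) := by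
  funext a b; exact Subsingleton.elim _ _

theorem pv_min?_some {α : Type} (xs : List α) (key : α → List Char) (h : xs ≠ []) :
    ∃ m, PySem.List.min? xs key = some m := by
  rcases hx : PySem.List.min? xs key with _ | m
  · rw [pvDecEq] at hx
    rcases xs with _ | ⟨x, t⟩
    · exact absurd rfl h
    · have : (x :: t) = [] :=
        (@PySem.List.min?_eq_none_iff α (List Char) _ LinearOrder.toDecidableLT (x :: t) key).mp hx
      simp at this
  · exact ⟨m, rfl⟩

theorem pv_max?_some {α : Type} (xs : List α) (key : α → List Char) (h : xs ≠ []) :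
    ∃ m, PySem.List.max? xs key = some m := by
  rcases hx : PySem.List.max? xs key with _ | m
  · rw [pvDecEq] at hx
    rcases xs with _ | ⟨x, t⟩
    · exact absurd rfl h
    · have : (x :: t) = [] :=
        (@PySem.List.max?_eq_none_iff α (List Char) _ LinearOrder.toDecidableLT (x :: t) key).mp hx
      simp at this
  · exact ⟨m, rfl⟩

theorem pvAmin_ne_nil (cs : List Char) (hcs : cs ≠ []) (w : Nat) : pvAmin cs w ≠ [] := by
  have hr : List.range cs.length ≠ [] := by
    simp [List.range_eq_nil, List.length_eq_zero_iff, hcs]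
  obtain ⟨m, hm⟩ := pv_min?_some (List.range cs.length) (pvKey cs w) hr
  apply List.ne_nil_of_mem (a := m)
  rw [mem_pvAmin]
  have hmem := PySem.List.min?_mem hm
  rw [pvDecEq] at hm
  exact ⟨List.mem_range.mp hmem,
    fun j' hj' => PySem.List.min?_isMin hm _ (List.mem_range.mpr hj')⟩

theorem pvAmax_ne_nil (cs : List Char) (hcs : cs ≠ []) (w : Nat) : pvAmax cs w ≠ [] := by
  have hr : List.range cs.length ≠ [] := by
    simp [List.range_eq_nil, List.length_eq_zero_iff, hcs]
  obtain ⟨m, hm⟩ := pv_max?_some (List.range cs.length) (pvKey cs w) hr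
  apply List.ne_nil_of_mem (a := m)
  rw [mem_pvAmax]
  have hmem := PySem.List.max?_mem hm
  rw [pvDecEq] at hm
  exact ⟨List.mem_range.mp hmem,
    fun j' hj' => PySem.List.max?_isMax hm _ (List.mem_range.mpr hj')⟩

theorem pvAmin_zero (cs : List Char) : pvAmin cs 0 = List.range cs.length := by
  apply List.filter_eq_self.mpr
  intro j _
  simp [pvKey]

theorem pvAmax_zero (cs : List Char) : pvAmax cs 0 = List.range cs.length := by
  apply List.filter_eq_self.mpr
  intro j _
  simp [pvKey]

-- one filtering round refines a width-v argmin set into the width-w2 argmin set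
theorem pv_step_min (cs : List Char) (hcs : cs ≠ []) (v w2 : Nat) (hv : v ≤ w2) :
    ((pvAmin cs v).map (Nat.cast : Nat → Int)).filter
        (fun j => PySem.List.slice (cs ++ cs) (some j) (some (j + (w2 : Int))) ==
          (PySem.List.min? (((pvAmin cs v).map (Nat.cast : Nat → Int)).map
              fun j => PySem.List.slice (cs ++ cs) (some j) (some (j + (w2 : Int))))
            (fun x => x)).getD [])
      = (pvAmin cs w2).map (Nat.cast : Nat → Int) := by
  have hsl : ∀ j₀ : Nat, PySem.List.slice (cs ++ cs) (some (j₀ : Int))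
      (some ((j₀ : Int) + (w2 : Int))) = pvKey cs w2 j₀ := by
    intro j₀
    rw [PySem.List.slice_natCast_add]
    rfl
  -- the mapped slice list is the key image of the argmin set
  have himg : ((pvAmin cs v).map (Nat.cast : Nat → Int)).map
      (fun j => PySem.List.slice (cs ++ cs) (some j) (some (j + (w2 : Int))))
      = (pvAmin cs v).map (pvKey cs w2) := by
    rw [List.map_map]
    exact List.map_congr_left (fun j₀ _ => hsl j₀)
  rw [himg]
  obtain ⟨m, hm⟩ := pv_min?_some ((pvAmin cs v).map (pvKey cs w2)) (fun x => x)
    (by simp [pvAmin_ne_nil cs hcs v])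
  rw [hm]
  simp only [Option.getD_some]
  have hmem := PySem.List.min?_mem hm
  rw [pvDecEq] at hm
  have hisMin := PySem.List.min?_isMin hm
  obtain ⟨j1, hj1mem, hj1⟩ := List.mem_map.mp hmem
  rw [List.filter_map]
  apply congrArg (List.map (Nat.cast : Nat → Int))
  -- reduce to a pointwise fact on positions below n
  have hstep : ∀ j₀ ∈ pvAmin cs v,
      ((fun j => PySem.List.slice (cs ++ cs) (some j) (some (j + (w2 : Int))) == m) ∘
        (Nat.cast : Nat → Int)) j₀ = (pvKey cs w2 j₀ == m) := by
    intro j₀ _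
    simp only [Function.comp_apply, hsl j₀]
  rw [List.filter_congr hstep]
  -- a global width-w2 argmin exists and lies in the width-v argmin set
  obtain ⟨js, hjs⟩ := List.exists_mem_of_ne_nil _ (pvAmin_ne_nil cs hcs w2)
  obtain ⟨hjsn, hjsmin⟩ := (mem_pvAmin cs w2 js).mp hjs
  have hjsv : js ∈ pvAmin cs v := by
    rw [mem_pvAmin]
    exact ⟨hjsn, fun j' hj' => pvKey_mono cs v w2 js j' hv (hjsmin j' hj')⟩
  have hm_le_js : m ≤ pvKey cs w2 js :=
    hisMin _ (List.mem_map.mpr ⟨js, hjsv, rfl⟩)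
  unfold pvAmin
  rw [List.filter_filter]
  apply List.filter_congr
  intro j₀ hj₀r
  have hj₀n := List.mem_range.mp hj₀r
  rw [Bool.eq_iff_iff]
  simp only [Bool.and_eq_true, decide_eq_true_eq, beq_iff_eq]
  constructor
  · rintro ⟨hkey, hPv⟩
    intro j' hj'r
    have hj' := List.mem_range.mp hj'r
    calc pvKey cs w2 j₀ = m := hkey
      _ ≤ pvKey cs w2 js := hm_le_js
      _ ≤ pvKey cs w2 j' := hjsmin j' hj'
  · intro hPw2
    have hPv : ∀ j' ∈ List.range cs.length, pvKey cs v j₀ ≤ pvKey cs v j' :=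
      fun j' hj' => pvKey_mono cs v w2 j₀ j' hv (hPw2 j' hj')
    have hj₀v : j₀ ∈ pvAmin cs v := by
      rw [mem_pvAmin]
      exact ⟨hj₀n, fun j' hj' => hPv j' (List.mem_range.mpr hj')⟩
    have h1 : pvKey cs w2 j₀ ≤ m := by
      rw [← hj1]
      exact hPw2 j1 (List.mem_range.mpr ((mem_pvAmin cs v j1).mp hj1mem).1)
    have h2 : m ≤ pvKey cs w2 j₀ := hisMin _ (List.mem_map.mpr ⟨j₀, hj₀v, rfl⟩)
    exact ⟨le_antisymm h1 h2, hPv⟩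

theorem pv_step_max (cs : List Char) (hcs : cs ≠ []) (v w2 : Nat) (hv : v ≤ w2) :
    ((pvAmax cs v).map (Nat.cast : Nat → Int)).filter
        (fun j => PySem.List.slice (cs ++ cs) (some j) (some (j + (w2 : Int))) ==
          (PySem.List.max? (((pvAmax cs v).map (Nat.cast : Nat → Int)).map
              fun j => PySem.List.slice (cs ++ cs) (some j) (some (j + (w2 : Int))))
            (fun x => x)).getD [])
      = (pvAmax cs w2).map (Nat.cast : Nat → Int) := by
  have hsl : ∀ j₀ : Nat, PySem.List.slice (cs ++ cs) (some (j₀ : Int))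
      (some ((j₀ : Int) + (w2 : Int))) = pvKey cs w2 j₀ := by
    intro j₀
    rw [PySem.List.slice_natCast_add]
    rfl
  have himg : ((pvAmax cs v).map (Nat.cast : Nat → Int)).map
      (fun j => PySem.List.slice (cs ++ cs) (some j) (some (j + (w2 : Int))))
      = (pvAmax cs v).map (pvKey cs w2) := by
    rw [List.map_map]
    exact List.map_congr_left (fun j₀ _ => hsl j₀)
  rw [himg]
  obtain ⟨m, hm⟩ := pv_max?_some ((pvAmax cs v).map (pvKey cs w2)) (fun x => x)
    (by simp [pvAmax_ne_nil cs hcs v])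
  rw [hm]
  simp only [Option.getD_some]
  have hmem := PySem.List.max?_mem hm
  rw [pvDecEq] at hm
  have hisMax := PySem.List.max?_isMax hm
  obtain ⟨j1, hj1mem, hj1⟩ := List.mem_map.mp hmem
  rw [List.filter_map]
  apply congrArg (List.map (Nat.cast : Nat → Int))
  have hstep : ∀ j₀ ∈ pvAmax cs v,
      ((fun j => PySem.List.slice (cs ++ cs) (some j) (some (j + (w2 : Int))) == m) ∘
        (Nat.cast : Nat → Int)) j₀ = (pvKey cs w2 j₀ == m) := by
    intro j₀ _
    simp only [Function.comp_apply, hsl j₀]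
  rw [List.filter_congr hstep]
  obtain ⟨js, hjs⟩ := List.exists_mem_of_ne_nil _ (pvAmax_ne_nil cs hcs w2)
  obtain ⟨hjsn, hjsmax⟩ := (mem_pvAmax cs w2 js).mp hjs
  have hjsv : js ∈ pvAmax cs v := by
    rw [mem_pvAmax]
    exact ⟨hjsn, fun j' hj' => pvKey_mono cs v w2 j' js hv (hjsmax j' hj')⟩
  have hjs_le_m : pvKey cs w2 js ≤ m :=
    hisMax _ (List.mem_map.mpr ⟨js, hjsv, rfl⟩)
  unfold pvAmax
  rw [List.filter_filter]
  apply List.filter_congr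
  intro j₀ hj₀r
  have hj₀n := List.mem_range.mp hj₀r
  rw [Bool.eq_iff_iff]
  simp only [Bool.and_eq_true, decide_eq_true_eq, beq_iff_eq]
  constructor
  · rintro ⟨hkey, hPv⟩
    intro j' hj'r
    have hj' := List.mem_range.mp hj'r
    calc pvKey cs w2 j' ≤ pvKey cs w2 js := hjsmax j' hj'
      _ ≤ m := hjs_le_m
      _ = pvKey cs w2 j₀ := hkey.symm
  · intro hPw2
    have hPv : ∀ j' ∈ List.range cs.length, pvKey cs v j' ≤ pvKey cs v j₀ :=
      fun j' hj' => pvKey_mono cs v w2 j' j₀ hv (hPw2 j' hj')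
    have hj₀v : j₀ ∈ pvAmax cs v := by
      rw [mem_pvAmax]
      exact ⟨hj₀n, fun j' hj' => hPv j' (List.mem_range.mpr hj')⟩
    have h1 : m ≤ pvKey cs w2 j₀ := by
      rw [← hj1]
      exact hPw2 j1 (List.mem_range.mpr ((mem_pvAmax cs v j1).mp hj1mem).1)
    have h2 : pvKey cs w2 j₀ ≤ m := hisMax _ (List.mem_map.mpr ⟨j₀, hj₀v, rfl⟩)
    exact ⟨le_antisymm h2 h1, hPv⟩

-- full loop invariant
theorem pvLoop_spec (cs : List Char) (hcs : cs ≠ []) :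
    ∀ (m w : Nat) (hw : 0 < w) (v v' : Nat), cs.length - w ≤ m → v ≤ w → v' ≤ w →
    ∃ u u', v ≤ u ∧ v' ≤ u' ∧
      pvLoop (cs ++ cs) cs.length w hw ((pvAmin cs v).map (Nat.cast : Nat → Int))
        ((pvAmax cs v').map (Nat.cast : Nat → Int))
        = ((pvAmin cs u).map (Nat.cast : Nat → Int), (pvAmax cs u').map (Nat.cast : Nat → Int)) ∧
      (w < cs.length → cs.length ≤ u ∧ cs.length ≤ u') := by
  intro m
  induction m with
  | zero =>
    intro w hw v v' hm hv hv'
    have hwn : ¬ w < cs.length := by omega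
    refine ⟨v, v', le_refl _, le_refl _, ?_, fun h => absurd h hwn⟩
    rw [pvLoop, dif_neg hwn]
  | succ m ih =>
    intro w hw v v' hm hv hv'
    by_cases hwn : w < cs.length
    · rw [pvLoop, dif_pos hwn]
      dsimp only
      rw [pv_step_min cs hcs v (w + w) (by omega), pv_step_max cs hcs v' (w + w) (by omega)]
      obtain ⟨u, u', h1, h2, h3, h4⟩ :=
        ih (w + w) (by omega) (w + w) (w + w) (by omega) (le_refl _) (le_refl _)
      refine ⟨u, u', by omega, by omega, h3, fun _ => ?_⟩
      by_cases hc : w + w < cs.length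
      · exact h4 hc
      · exact ⟨by omega, by omega⟩
    · refine ⟨v, v', le_refl _, le_refl _, ?_, fun h => absurd h hwn⟩
      rw [pvLoop, dif_neg hwn]

-- A's slice pair is the rotation
theorem pv_rot_slices (cs : List Char) (j : Nat) :
    PySem.List.slice cs (some (j : Int)) none ++ PySem.List.slice cs none (some (j : Int)) =
      pvRot cs j := by
  rw [PySem.List.slice_from_natCast, PySem.List.slice_to_natCast]; rfl

theorem pv_min_step (a b : List Char) : (if b < a then b else a) = min a b := by
  by_cases h : b < a
  · simp [h, le_of_lt h]
  · simp [h, le_of_not_gt h]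

theorem pv_max_step (a b : List Char) : (if a < b then b else a) = max a b := by
  by_cases h : a < b
  · simp [h, le_of_lt h]
  · simp [h, le_of_not_gt h]

-- A's result, characterised as running min/max over the rotations
theorem pvA_char (s : String) :
    get_min_max_str s =
      (String.ofList (List.foldl (fun a k => min a (pvRot s.toList k)) s.toList
        (List.range s.toList.length)),
       String.ofList (List.foldl (fun a k => max a (pvRot s.toList k)) s.toList
        (List.range s.toList.length))) := by
  unfold get_min_max_str
  dsimp only
  rw [PySem.List.pyRange_zero_natCast s.toList.length, List.foldl_map]
  have hbody := PySem.List.foldl_congr_mem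
    (l := List.range s.toList.length)
    (init := (s.toList, s.toList))
    (f := fun (st : List Char × List Char) (k : Nat) =>
      (if (PySem.List.slice s.toList (some (k : Int)) none ++
            PySem.List.slice s.toList none (some (k : Int))) < st.1
        then PySem.List.slice s.toList (some (k : Int)) none ++
            PySem.List.slice s.toList none (some (k : Int)) else st.1,
       if st.2 < (PySem.List.slice s.toList (some (k : Int)) none ++
            PySem.List.slice s.toList none (some (k : Int)))
        then PySem.List.slice s.toList (some (k : Int)) none ++
            PySem.List.slice s.toList none (some (k : Int)) else st.2))
    (g := fun (st : List Char × List Char) (k : Nat) =>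
      (min st.1 (pvRot s.toList k), max st.2 (pvRot s.toList k)))
    (by intro acc k _
        simp only [pv_rot_slices, pv_min_step, pv_max_step])
  simp only [hbody]
  rw [PySem.List.foldl_prod_mk (f := fun a k => min a (pvRot s.toList k))
    (g := fun a k => max a (pvRot s.toList k))]

theorem pvRot_zero (cs : List Char) : pvRot cs 0 = cs := by simp [pvRot]

-- the argmin position (at a width covering the whole rotation) realises A's running min
theorem pv_fold_min (cs : List Char) (u j₀ : Nat) (hj : j₀ ∈ pvAmin cs u)
    (hu : cs.length ≤ u ∨ cs.length = 1) :
    List.foldl (fun a k => min a (pvRot cs k)) cs (List.range cs.length) = pvRot cs j₀ := by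
  obtain ⟨hj₀n, hmin⟩ := (mem_pvAmin cs u j₀).mp hj
  have hrot_le : ∀ k < cs.length, pvRot cs j₀ ≤ pvRot cs k := by
    intro k hk
    rcases hu with hu | h1
    · have h2 := pv_take_le cs.length _ _ (hmin k hk)
      rwa [pvKey_rot cs u j₀ (le_of_lt hj₀n) hu, pvKey_rot cs u k (le_of_lt hk) hu] at h2
    · have : j₀ = k := by omega
      rw [this]
  have hmap : List.foldl (fun a k => min a (pvRot cs k)) cs (List.range cs.length)
      = List.foldl min cs ((List.range cs.length).map (pvRot cs)) := by
    rw [List.foldl_map]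
  rw [hmap]
  apply le_antisymm
  · exact (PySem.List.foldl_min_le _ _).2 _ (List.mem_map.mpr ⟨j₀, List.mem_range.mpr hj₀n, rfl⟩)
  · rcases PySem.List.foldl_min_mem ((List.range cs.length).map (pvRot cs)) cs with h | h
    · rw [h]
      have h0 := hrot_le 0 (by omega)
      rwa [pvRot_zero] at h0
    · obtain ⟨k, hk, hke⟩ := List.mem_map.mp h
      rw [← hke]
      exact hrot_le k (List.mem_range.mp hk)

theorem pv_fold_max (cs : List Char) (u j₀ : Nat) (hj : j₀ ∈ pvAmax cs u)
    (hu : cs.length ≤ u ∨ cs.length = 1) :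
    List.foldl (fun a k => max a (pvRot cs k)) cs (List.range cs.length) = pvRot cs j₀ := by
  obtain ⟨hj₀n, hmax⟩ := (mem_pvAmax cs u j₀).mp hj
  have hrot_ge : ∀ k < cs.length, pvRot cs k ≤ pvRot cs j₀ := by
    intro k hk
    rcases hu with hu | h1
    · have h2 := pv_take_le cs.length _ _ (hmax k hk)
      rwa [pvKey_rot cs u j₀ (le_of_lt hj₀n) hu, pvKey_rot cs u k (le_of_lt hk) hu] at h2
    · have : j₀ = k := by omega
      rw [this]
  have hmap : List.foldl (fun a k => max a (pvRot cs k)) cs (List.range cs.length)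
      = List.foldl max cs ((List.range cs.length).map (pvRot cs)) := by
    rw [List.foldl_map]
  rw [hmap]
  apply le_antisymm
  · rcases PySem.List.foldl_max_mem ((List.range cs.length).map (pvRot cs)) cs with h | h
    · rw [h]
      have h0 := hrot_ge 0 (by omega)
      rwa [pvRot_zero] at h0
    · obtain ⟨k, hk, hke⟩ := List.mem_map.mp h
      rw [← hke]
      exact hrot_ge k (List.mem_range.mp hk)
  · exact (PySem.List.le_foldl_max _ _).2 _ (List.mem_map.mpr ⟨j₀, List.mem_range.mpr hj₀n, rfl⟩)

-- ===== VERDICT (by name: the statement is the Claim_ definition above) =====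
theorem get_min_max_str_spec : Claim_equal_get_min_max_str := by
  intro s _
  unfold Spec_get_min_max_str
  rw [pvA_char]
  unfold get_min_max_str_alt
  dsimp only
  by_cases hn : s.toList.length = 0
  · rw [if_pos hn]
    have hnil : s.toList = [] := List.length_eq_zero_iff.mp hn
    have hs : String.ofList s.toList = s := by simp
    rw [hnil] at hs ⊢
    simp [hs]
  · rw [if_neg hn]
    set cs := s.toList with hcs
    have hcne : cs ≠ [] := fun h => hn (by simp [h])
    rw [show PySem.List.pyRange 0 (cs.length : Int) 1 = (List.range cs.length).map (Nat.cast : Nat → Int)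
      from PySem.List.pyRange_zero_natCast cs.length]
    have hinit : pvLoop (cs ++ cs) cs.length 1 (by omega)
        ((List.range cs.length).map (Nat.cast : Nat → Int))
        ((List.range cs.length).map (Nat.cast : Nat → Int))
        = pvLoop (cs ++ cs) cs.length 1 (by omega)
        ((pvAmin cs 0).map (Nat.cast : Nat → Int))
        ((pvAmax cs 0).map (Nat.cast : Nat → Int)) := by
      rw [pvAmin_zero, pvAmax_zero]
    rw [hinit]
    obtain ⟨u, u', hvu, hvu', heq, himp⟩ :=
      pvLoop_spec cs hcne cs.length 1 (by omega) 0 0 (by omega) (by omega) (by omega)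
    rw [heq]
    have hu : cs.length ≤ u ∨ cs.length = 1 := by
      rcases Nat.lt_or_ge 1 cs.length with h1 | h1
      · exact Or.inl (himp h1).1
      · right
        have : cs.length ≠ 0 := hn
        omega
    have hu' : cs.length ≤ u' ∨ cs.length = 1 := by
      rcases Nat.lt_or_ge 1 cs.length with h1 | h1
      · exact Or.inl (himp h1).2
      · right
        have : cs.length ≠ 0 := hn
        omega
    obtain ⟨j₀, t₀, hj0⟩ := List.exists_cons_of_ne_nil (pvAmin_ne_nil cs hcne u)
    obtain ⟨j₁, t₁, hj1⟩ := List.exists_cons_of_ne_nil (pvAmax_ne_nil cs hcne u')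
    have hj0mem : j₀ ∈ pvAmin cs u := by rw [hj0]; exact List.mem_cons_self
    have hj1mem : j₁ ∈ pvAmax cs u' := by rw [hj1]; exact List.mem_cons_self
    rw [hj0, hj1]
    simp only [List.map_cons, PySem.List.pyGetD_zero_cons]
    have hsl : ∀ j : Nat, j < cs.length →
        PySem.List.slice (cs ++ cs) (some (j : Int)) (some ((j : Int) + (cs.length : Int)))
          = pvRot cs j := by
      intro j hjn
      rw [PySem.List.slice_natCast_add]
      exact pvKey_len cs j (le_of_lt hjn)
    rw [hsl j₀ ((mem_pvAmin cs u j₀).mp hj0mem).1, hsl j₁ ((mem_pvAmax cs u' j₁).mp hj1mem).1]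
    rw [pv_fold_min cs u j₀ hj0mem hu, pv_fold_max cs u' j₁ hj1mem hu']
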